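-- pv_equiv track=rewrite | github.com/JeonSeokMin/Python_algorithm | programmers_AI/apple.py | solution
-- ===== SOURCE A (Python) =====
-- def solution(k, m, score):
--
--     score.sort()
--
--     result_list = []
--     price_list = []
--
--     for i in range(len(score) // m):
--         for j in range(m):
--             result_list.append(score.pop())
--
--         price_list.append(min(result_list)*m)
--         result_list = []
--
--     answer = sum(price_list)
--
--     return answer
-- ===== SOURCE B (Python) =====
-- # Simpler closed-index rewrite: sort once; the minimum of the i-th popped group of m
-- # apples is exactly sorted[n-(i+1)*m], so the answer is one indexed sum (no pop loop,
-- # no accumulator lists, no repeated min scans).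
-- # NOTE: A mutates its `score` argument (sorts it in place and pops the consumed
-- # elements); B leaves `score` untouched — the equivalence claimed is about the
-- # return value only.
-- def solution(k, m, score):
--     s = sorted(score)
--     n = len(s)
--     return m * sum(s[n - (i + 1) * m] for i in range(n // m))
-- ===== Notes on version B (the rewrite author's own statement) =====
-- stated objective: simpler
-- what changed: Instead of repeatedly popping m elements off the sorted list, collecting them in an accumulator and re-scanning each group with min(), B sorts once and reads each group minimum directly at index n-(i+1)*m, summing in one indexed pass; B does not mutate the score argument (A sorts it in place and pops from it) - the equivalence is about the return value.
-- outside the precondition, e.g. on solution(1, 0, [1, 2, 3]): A raises ZeroDivisionError, B raises ZeroDivisionError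
import Mathlib
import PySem

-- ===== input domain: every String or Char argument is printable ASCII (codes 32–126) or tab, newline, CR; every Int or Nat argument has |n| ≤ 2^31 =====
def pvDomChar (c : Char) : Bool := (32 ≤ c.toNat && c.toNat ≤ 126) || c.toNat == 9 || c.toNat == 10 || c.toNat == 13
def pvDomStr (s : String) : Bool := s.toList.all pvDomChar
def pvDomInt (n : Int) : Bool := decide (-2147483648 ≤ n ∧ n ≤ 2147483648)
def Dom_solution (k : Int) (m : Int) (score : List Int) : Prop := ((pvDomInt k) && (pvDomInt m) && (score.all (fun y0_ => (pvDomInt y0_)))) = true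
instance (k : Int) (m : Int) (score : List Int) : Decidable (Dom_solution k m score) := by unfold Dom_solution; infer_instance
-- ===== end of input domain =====

-- B replaces A's pop-m-elements-then-min loop by one indexed sum over the sorted list (simpler).
-- A mutates its `score` argument (in-place sort + pops); B does not — the claim is about the return value only.

-- ===== PORT A =====
-- result_list.append(score.pop()); the `none` arm (Python IndexError) is unreachable when m ≠ 0
def popStep (p : List Int × List Int) : List Int × List Int :=
  match PySem.List.pop? p.1 with
  | some (v, rest) => (rest, p.2 ++ [v])
  | none => p

-- for j in range(m): result_list.append(score.pop())
def innerLoop (m : Int) (cur : List Int) : List Int × List Int :=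
  (PySem.List.pyRange 0 m).foldl (fun p _ => popStep p) (cur, [])

-- one outer iteration: pop m elements, then price_list.append(min(result_list)*m)
-- (min([]) would raise in Python; the `.getD 0` default is unreachable when m ≠ 0)
def outerStep (m : Int) (st : List Int × List Int) : List Int × List Int :=
  let r := innerLoop m st.1
  (r.1, st.2 ++ [(PySem.List.min? r.2 (fun x => x)).getD 0 * m])

def solution (k : Int) (m : Int) (score : List Int) : Int :=
  let s := PySem.List.sorted score (fun x => x)
  let prices :=
    ((PySem.List.pyRange 0 (PySem.Int.floordiv (s.length : Int) m)).foldl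
      (fun st _ => outerStep m st) (s, [])).2
  prices.sum

-- ===== PORT B =====
def solution_alt (k : Int) (m : Int) (score : List Int) : Int :=
  let s := PySem.List.sorted score (fun x => x)
  let n : Int := (s.length : Int)
  m * ((PySem.List.pyRange 0 (PySem.Int.floordiv n m)).map
        (fun i => PySem.List.pyGetD s (n - (i + 1) * m) 0)).sum

-- ===== PRECONDITION & SPEC =====
-- Pre_ excludes only m = 0, on which Python A raises ZeroDivisionError at `len(score) // m` (B raises there too).
def Pre_solution (k : Int) (m : Int) (score : List Int) : Prop := m ≠ 0
instance (k : Int) (m : Int) (score : List Int) : Decidable (Pre_solution k m score) := by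
  unfold Pre_solution; infer_instance

def pvWitness_solution : Int × Int × List Int := (0, 2, [4, 1, 2, 3, 5, 6])

def Spec_solution (k : Int) (m : Int) (score : List Int) (out : Int) : Prop := out = solution_alt k m score
instance (k : Int) (m : Int) (score : List Int) (out : Int) : Decidable (Spec_solution k m score out) := by unfold Spec_solution; infer_instance

-- ===== CLAIM (what is proved, stated in full; the proofs are below) =====
def Claim_equal_solution : Prop := ∀ (k : Int) (m : Int) (score : List Int), Dom_solution k m score → Pre_solution k m score → Spec_solution k m score (solution k m score)

-- ===== LEMMAS AND PROOFS =====

-- the inner pop loop (one iteration per element of l) removes the last w.length elements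
-- of the list `u ++ w.reverse` and appends them to the accumulator in pop order
theorem innerFold (l : List Int) (u w res : List Int) (hl : l.length = w.length) :
    l.foldl (fun p _ => popStep p) (u ++ w.reverse, res) = (u, res ++ w) := by
  induction l generalizing w res with
  | nil =>
    have : w = [] := by cases w <;> simp_all
    simp [this]
  | cons x l' ih =>
    cases w with
    | nil => simp at hl
    | cons y w' =>
      simp only [List.foldl_cons]
      have hpop : popStep (u ++ (y :: w').reverse, res) = (u ++ w'.reverse, res ++ [y]) := by
        simp [popStep, List.reverse_cons, ← List.append_assoc, PySem.List.pop?_last]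
      rw [hpop, ih w' (res ++ [y]) (by simpa using hl)]
      simp

-- min over the reversed length-M suffix of a sorted prefix is the element at L - M
theorem min_suffix (s : List Int) (hs : s.Pairwise (· ≤ ·)) (L M : Nat)
    (hM : 1 ≤ M) (hML : M ≤ L) (hLN : L ≤ s.length) :
    ((PySem.List.min? ((s.take L).drop (L - M)).reverse (fun x => x)).getD 0) = s.getD (L - M) 0 := by
  set suf := (s.take L).drop (L - M) with hsuf
  have hlen : suf.length = M := by
    simp [hsuf, List.length_drop, List.length_take]
    omega
  have hne : suf.reverse ≠ [] := by
    intro h; rw [List.reverse_eq_nil_iff] at h; simp [h] at hlen; omega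
  obtain ⟨v, hv⟩ : ∃ v, PySem.List.min? suf.reverse (fun x => x) = some v := by
    cases hmin : PySem.List.min? suf.reverse (fun x => x) with
    | none => exact absurd ((PySem.List.min?_eq_none_iff _ _).mp hmin) hne
    | some v => exact ⟨v, rfl⟩
  have hidx : L - M < s.length := by omega
  have hhead : suf[0]'(by omega) = s[L - M]'hidx := by
    simp [hsuf, List.getElem_drop, List.getElem_take]
  have hpair : suf.Pairwise (· ≤ ·) :=
    ((hs.sublist (List.take_sublist L s)).sublist (List.drop_sublist (L - M) _))
  have hvmem : v ∈ suf := by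
    have := PySem.List.min?_mem hv; simpa using this
  have h1 : suf[0]'(by omega) ≤ v := by
    obtain ⟨j, hj, hje⟩ := List.getElem_of_mem hvmem
    rcases Nat.eq_zero_or_pos j with h0 | hpos
    · subst h0; rw [hje]
    · exact hje ▸ List.pairwise_iff_getElem.mp hpair 0 j (by omega) hj hpos
  have h2 : v ≤ suf[0]'(by omega) := by
    have := PySem.List.min?_isMin hv (suf[0]'(by omega)) (by simp)
    simpa using this
  have : v = s[L - M]'hidx := le_antisymm (hhead ▸ h2) (hhead ▸ h1)
  rw [hv, Option.getD_some, this, List.getD_eq_getElem s 0 hidx]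

-- outer loop invariant: after i iterations the i*M largest elements are consumed and
-- price_list holds the group minima times M
theorem outerLoop_spec (s : List Int) (hs : s.Pairwise (· ≤ ·)) (M : Nat) (hM : 1 ≤ M)
    (i : Nat) (hi : i ≤ s.length / M) :
    (List.range i).foldl (fun st _ => outerStep (M : Int) st) (s, ([] : List Int)) =
      (s.take (s.length - i * M),
       (List.range i).map (fun j => s.getD (s.length - (j + 1) * M) 0 * (M : Int))) := by
  induction i with
  | zero => simp
  | succ i ih =>
    have hi' : i ≤ s.length / M := by omega
    have hiM : i * M + M ≤ s.length := by
      have := (Nat.le_div_iff_mul_le (k := M) (by omega)).mp hi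
      rwa [Nat.succ_mul] at this
    set N := s.length with hN
    set L := N - i * M with hL
    have hML : M ≤ L := by omega
    have hLN : L ≤ N := by omega
    rw [List.range_succ, List.foldl_append, ih hi']
    simp only [List.foldl_cons, List.foldl_nil]
    unfold outerStep
    have hlen : ((s.take L).drop (L - M)).reverse.length = M := by
      simp [List.length_drop, List.length_take]; omega
    have hsplit : s.take L = (s.take L).take (L - M) ++ (((s.take L).drop (L - M)).reverse).reverse := by
      simp [List.take_append_drop]
    have hrange : (PySem.List.pyRange 0 (M : Int)).length = M := by
      simp [PySem.List.length_pyRange_one]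
    have hinner : innerLoop (M : Int) (s.take L) = ((s.take L).take (L - M), ((s.take L).drop (L - M)).reverse) := by
      unfold innerLoop
      rw [show ((s.take L, ([] : List Int)) : List Int × List Int) = ((s.take L).take (L - M) ++ (((s.take L).drop (L - M)).reverse).reverse, ([] : List Int)) by rw [← hsplit]]
      exact innerFold _ _ _ _ (by rw [hrange, hlen])
    rw [hinner]
    have htt : (s.take L).take (L - M) = s.take (N - (i + 1) * M) := by
      rw [List.take_take]
      congr 1
      rw [Nat.succ_mul]
      omega
    dsimp only
    rw [min_suffix s hs L M hM hML hLN, htt]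
    have hLM : L - M = N - (i + 1) * M := by rw [Nat.succ_mul]; omega
    rw [hLM]
    simp

theorem solutions_agree (k m : Int) (score : List Int) (hm : m ≠ 0) :
    solution k m score = solution_alt k m score := by
  unfold solution solution_alt
  dsimp only
  set s := PySem.List.sorted score (fun x => x) with hsdef
  have hs : s.Pairwise (· ≤ ·) := PySem.List.sorted_pairwise score (fun x => x)
  set N := s.length with hN
  rcases lt_or_gt_of_ne hm with hneg | hpos
  · -- m < 0 : the range is empty on both sides, both return 0
    have hq : PySem.Int.floordiv (N : Int) m ≤ 0 := by
      have h1 := PySem.Int.floordiv_mul_add_mod (N : Int) m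
      have h2 := PySem.Int.mod_neg_bounds (N : Int) hneg
      nlinarith [Int.natCast_nonneg N]
    rw [PySem.List.pyRange_one_eq_nil hq]
    simp
  · -- m > 0
    obtain ⟨M, rfl⟩ : ∃ M : Nat, m = (M : Int) := ⟨m.toNat, by omega⟩
    have hM : 1 ≤ M := by omega
    set Q := N / M with hQ
    rw [show PySem.Int.floordiv (N : Int) (M : Int) = (Q : Int) from PySem.Int.floordiv_natCast N M,
        PySem.List.pyRange_zero_natCast]
    rw [List.foldl_map, outerLoop_spec s hs M hM Q le_rfl]
    rw [List.map_map]
    have hpt : ∀ j ∈ List.range Q,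
        (fun i => PySem.List.pyGetD s ((N : Int) - (i + 1) * (M : Int)) 0) ((fun k : Nat => (k : Int)) j)
          = s.getD (N - (j + 1) * M) 0 := by
      intro j hj
      dsimp only
      have hjQ : (j + 1) * M ≤ N := (Nat.le_div_iff_mul_le (by omega)).mp (List.mem_range.mp hj)
      have hidx : (N : Int) - ((j : Int) + 1) * (M : Int) = ((N - (j + 1) * M : Nat) : Int) := by
        push_cast [hjQ]; ring
      have hlt : N - (j + 1) * M < N := by
        have : 1 * M ≤ (j + 1) * M := Nat.mul_le_mul_right M (by omega)
        omega
      rw [hidx, PySem.List.pyGetD_eq_getElem s 0 (by positivity) (by exact_mod_cast hlt)]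
      rw [List.getD_eq_getElem s 0 (by rw [← hN]; exact hlt)]
      simp
    rw [show (List.map ((fun i => PySem.List.pyGetD s ((N:Int) - (i + 1) * (M:Int)) 0) ∘ (fun k : Nat => (k : Int))) (List.range Q)) = List.map (fun j => s.getD (N - (j + 1) * M) 0) (List.range Q) from List.map_congr_left hpt]
    rw [List.sum_map_mul_right]
    ring

-- ===== VERDICT (by name: the statement is the Claim_ definition above) =====
theorem solution_spec : Claim_equal_solution := by
  intro k m score _ hpre
  unfold Spec_solution
  exact solutions_agree k m score hpre
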